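-- pv_equiv track=rewrite | github.com/pauloaviana/ndde_project | src/trevisan/trevisan_utils.py | calculate_fitness_parameters
-- ===== SOURCE A (Python) =====
-- def calculate_fitness_parameters(y, adj_matrix, adj_list):
--     n = len(adj_matrix)
--     m1 = 0
--     m2 = 0
--     c = 0
--     xx = 0
--
--     for i in range(n):
--         for j in adj_list[i]:
--             if j > i:
--                 m1 += adj_matrix[i][j]
--                 if y[i] == 0 and y[j] == 0:
--                     m2 += adj_matrix[i][j]
--                 elif y[i] * y[j] == -1:
--                     c += adj_matrix[i][j]
--                 elif abs(y[i] + y[j]) == 1: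
--                     xx += adj_matrix[i][j]
--     return c, xx, m1-m2
-- ===== SOURCE B (Python) =====
-- def calculate_fitness_parameters(y, adj_matrix, adj_list):
--     n = len(adj_matrix)
--     edges = [(y[i], y[j], adj_matrix[i][j])
--              for i in range(n) for j in adj_list[i] if j > i]
--     c = sum(w for a, b, w in edges if a * b == -1)
--     xx = sum(w for a, b, w in edges
--              if a * b != -1 and not (a == 0 and b == 0) and abs(a + b) == 1)
--     net = sum(w for a, b, w in edges if not (a == 0 and b == 0))
--     return c, xx, net
-- ===== Notes on version B (the rewrite author's own statement) =====
-- stated objective: simpler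
-- what changed: Replaces the four running accumulators and the elif cascade by building the upper (j>i) edge list once and computing each returned component as an independent filtered sum (c, xx, and the net m1-m2 collapsed into a single not-both-zero sum).
import Mathlib
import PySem

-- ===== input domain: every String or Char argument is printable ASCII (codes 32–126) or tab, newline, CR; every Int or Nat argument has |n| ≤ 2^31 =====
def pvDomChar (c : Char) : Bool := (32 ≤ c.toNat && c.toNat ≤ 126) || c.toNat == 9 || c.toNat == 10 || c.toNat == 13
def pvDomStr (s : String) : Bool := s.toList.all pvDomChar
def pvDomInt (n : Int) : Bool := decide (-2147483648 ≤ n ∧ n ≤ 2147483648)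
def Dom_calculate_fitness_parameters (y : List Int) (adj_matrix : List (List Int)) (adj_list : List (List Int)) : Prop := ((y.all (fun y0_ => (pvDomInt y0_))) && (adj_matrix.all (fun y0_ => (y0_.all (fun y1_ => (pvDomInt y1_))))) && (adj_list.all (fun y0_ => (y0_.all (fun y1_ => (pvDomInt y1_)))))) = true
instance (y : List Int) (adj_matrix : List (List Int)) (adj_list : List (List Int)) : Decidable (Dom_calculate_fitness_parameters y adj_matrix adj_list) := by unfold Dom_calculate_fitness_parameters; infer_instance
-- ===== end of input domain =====

-- B replaces A's four running accumulators and elif cascade by one edge list and three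
-- independent filtered sums (objective: simpler); equivalence is about the return value.

-- ===== PORT A =====
def calculate_fitness_parameters (y : List Int) (adj_matrix : List (List Int)) (adj_list : List (List Int)) : Int × Int × Int :=
  let n : Int := (adj_matrix.length : Int)
  let s : Int × Int × Int × Int :=
    (PySem.List.pyRange 0 n 1).foldl (fun (s : Int × Int × Int × Int) i =>
      (PySem.List.pyGetD adj_list i []).foldl (fun (s : Int × Int × Int × Int) j =>
        if i < j then
          let w := PySem.List.pyGetD (PySem.List.pyGetD adj_matrix i []) j 0
          let yi := PySem.List.pyGetD y i 0
          let yj := PySem.List.pyGetD y j 0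
          let m1 := s.1 + w
          if yi = 0 ∧ yj = 0 then (m1, s.2.1 + w, s.2.2.1, s.2.2.2)
          else if yi * yj = -1 then (m1, s.2.1, s.2.2.1 + w, s.2.2.2)
          else if (yi + yj).natAbs = 1 then (m1, s.2.1, s.2.2.1, s.2.2.2 + w)
          else (m1, s.2.1, s.2.2.1, s.2.2.2)
        else s) s) (0, 0, 0, 0)
  (s.2.2.1, s.2.2.2, s.1 - s.2.1)

-- ===== PORT B =====
def calculate_fitness_parameters_alt (y : List Int) (adj_matrix : List (List Int)) (adj_list : List (List Int)) : Int × Int × Int :=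
  let n : Int := (adj_matrix.length : Int)
  let edges : List (Int × Int × Int) :=
    (PySem.List.pyRange 0 n 1).flatMap (fun i =>
      ((PySem.List.pyGetD adj_list i []).filter (fun j => decide (i < j))).map (fun j =>
        (PySem.List.pyGetD y i 0, PySem.List.pyGetD y j 0,
         PySem.List.pyGetD (PySem.List.pyGetD adj_matrix i []) j 0)))
  let c := ((edges.filter (fun e => decide (e.1 * e.2.1 = -1))).map (fun e => e.2.2)).sum
  let xx := ((edges.filter (fun e => decide (e.1 * e.2.1 ≠ -1 ∧ ¬(e.1 = 0 ∧ e.2.1 = 0) ∧ (e.1 + e.2.1).natAbs = 1))).map (fun e => e.2.2)).sum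
  let net := ((edges.filter (fun e => decide (¬(e.1 = 0 ∧ e.2.1 = 0)))).map (fun e => e.2.2)).sum
  (c, xx, net)

-- ===== PRECONDITION & SPEC =====
-- Pre_ excludes exactly the inputs on which the Python A raises IndexError: an adjacency
-- list shorter than the matrix, or a listed neighbour j > i beyond row i of the matrix or
-- beyond y.  (Entries j ≤ i, including negative ones, are skipped by A and stay admitted.)
def Pre_calculate_fitness_parameters (y : List Int) (adj_matrix : List (List Int)) (adj_list : List (List Int)) : Prop :=
  adj_matrix.length ≤ adj_list.length ∧
  ∀ i < adj_matrix.length, ∀ j ∈ adj_list[i]!, (i : Int) < j →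
    (j < ((adj_matrix[i]!).length : Int) ∧ j < (y.length : Int))
instance (y : List Int) (adj_matrix : List (List Int)) (adj_list : List (List Int)) : Decidable (Pre_calculate_fitness_parameters y adj_matrix adj_list) := by unfold Pre_calculate_fitness_parameters; infer_instance
def pvWitness_calculate_fitness_parameters : List Int × List (List Int) × List (List Int) :=
  ([1, -1, 0], [[0, 1, 1], [1, 0, 1], [1, 1, 0]], [[1, 2], [0, 2], [0, 1]])
def Spec_calculate_fitness_parameters (y : List Int) (adj_matrix : List (List Int)) (adj_list : List (List Int)) (out : Int × Int × Int) : Prop := out = calculate_fitness_parameters_alt y adj_matrix adj_list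
instance (y : List Int) (adj_matrix : List (List Int)) (adj_list : List (List Int)) (out : Int × Int × Int) : Decidable (Spec_calculate_fitness_parameters y adj_matrix adj_list out) := by unfold Spec_calculate_fitness_parameters; infer_instance

-- ===== CLAIM (what is proved, stated in full; the proofs are below) =====
def Claim_equal_calculate_fitness_parameters : Prop := ∀ (y : List Int) (adj_matrix : List (List Int)) (adj_list : List (List Int)), Dom_calculate_fitness_parameters y adj_matrix adj_list → Pre_calculate_fitness_parameters y adj_matrix adj_list → Spec_calculate_fitness_parameters y adj_matrix adj_list (calculate_fitness_parameters y adj_matrix adj_list)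

-- ===== LEMMAS AND PROOFS =====

-- A's per-edge state update, on the edge triple (y[i], y[j], w)
def pvStep (s : Int × Int × Int × Int) (e : Int × Int × Int) : Int × Int × Int × Int :=
  let m1 := s.1 + e.2.2
  if e.1 = 0 ∧ e.2.1 = 0 then (m1, s.2.1 + e.2.2, s.2.2.1, s.2.2.2)
  else if e.1 * e.2.1 = -1 then (m1, s.2.1, s.2.2.1 + e.2.2, s.2.2.2)
  else if (e.1 + e.2.1).natAbs = 1 then (m1, s.2.1, s.2.2.1, s.2.2.2 + e.2.2)
  else (m1, s.2.1, s.2.2.1, s.2.2.2)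

def pvTot (es : List (Int × Int × Int)) : Int := (es.map (fun e => e.2.2)).sum
def pvZ (es : List (Int × Int × Int)) : Int :=
  ((es.filter (fun e => decide (e.1 = 0 ∧ e.2.1 = 0))).map (fun e => e.2.2)).sum
def pvC (es : List (Int × Int × Int)) : Int :=
  ((es.filter (fun e => decide (e.1 * e.2.1 = -1))).map (fun e => e.2.2)).sum
def pvX (es : List (Int × Int × Int)) : Int :=
  ((es.filter (fun e => decide (e.1 * e.2.1 ≠ -1 ∧ ¬(e.1 = 0 ∧ e.2.1 = 0) ∧ (e.1 + e.2.1).natAbs = 1))).map (fun e => e.2.2)).sum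
def pvNet (es : List (Int × Int × Int)) : Int :=
  ((es.filter (fun e => decide (¬(e.1 = 0 ∧ e.2.1 = 0)))).map (fun e => e.2.2)).sum

theorem pv_fold_step (es : List (Int × Int × Int)) (s : Int × Int × Int × Int) :
    es.foldl pvStep s = (s.1 + pvTot es, s.2.1 + pvZ es, s.2.2.1 + pvC es, s.2.2.2 + pvX es) := by
  induction es generalizing s with
  | nil => simp [pvTot, pvZ, pvC, pvX]
  | cons e es ih =>
    obtain ⟨a, b, w⟩ := e
    simp only [List.foldl_cons, ih]
    by_cases h1 : a = 0 <;> by_cases h2 : b = 0 <;> by_cases hp : a * b = -1 <;>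
      by_cases hn : (a + b).natAbs = 1 <;>
        simp [pvStep, pvTot, pvZ, pvC, pvX, h1, h2, hp, hn, Prod.ext_iff] <;>
          (try split_ifs) <;> (try simp_all) <;> omega

theorem pv_tot_split (es : List (Int × Int × Int)) : pvTot es = pvZ es + pvNet es := by
  induction es with
  | nil => simp [pvTot, pvZ, pvNet]
  | cons e es ih =>
    by_cases h1 : e.1 = 0 <;> by_cases h2 : e.2.1 = 0 <;>
      simp [pvTot, pvZ, pvNet, h1, h2] at ih ⊢ <;> omega

-- ===== VERDICT (by name: the statement is the Claim_ definition above) =====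
theorem calculate_fitness_parameters_spec : Claim_equal_calculate_fitness_parameters := by
  intro y M L _ _
  unfold Spec_calculate_fitness_parameters
  have hfold : ∀ (i : Int) (s : Int × Int × Int × Int),
      (PySem.List.pyGetD L i []).foldl (fun (s : Int × Int × Int × Int) j =>
        if i < j then
          let w := PySem.List.pyGetD (PySem.List.pyGetD M i []) j 0
          let yi := PySem.List.pyGetD y i 0
          let yj := PySem.List.pyGetD y j 0
          let m1 := s.1 + w
          if yi = 0 ∧ yj = 0 then (m1, s.2.1 + w, s.2.2.1, s.2.2.2)
          else if yi * yj = -1 then (m1, s.2.1, s.2.2.1 + w, s.2.2.2)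
          else if (yi + yj).natAbs = 1 then (m1, s.2.1, s.2.2.1, s.2.2.2 + w)
          else (m1, s.2.1, s.2.2.1, s.2.2.2)
        else s) s
      = (((PySem.List.pyGetD L i []).filter (fun j => decide (i < j))).map (fun j =>
          (PySem.List.pyGetD y i 0, PySem.List.pyGetD y j 0,
           PySem.List.pyGetD (PySem.List.pyGetD M i []) j 0))).foldl pvStep s := by
    intro i s
    rw [List.foldl_map, List.foldl_filter]
    refine List.foldl_ext _ _ s ?_
    intro s' j _
    by_cases hj : i < j <;> simp [hj, pvStep]
  have hE : ∀ (E : List (Int × Int × Int)), (pvC E, pvX E, pvTot E - pvZ E) = (pvC E, pvX E, pvNet E) := by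
    intro E
    simp only [Prod.mk.injEq]
    refine ⟨trivial, trivial, ?_⟩
    rw [pv_tot_split E]
    ring
  show (let s := (PySem.List.pyRange 0 (M.length : Int) 1).foldl (fun (s : Int × Int × Int × Int) i =>
      (PySem.List.pyGetD L i []).foldl (fun (s : Int × Int × Int × Int) j =>
        if i < j then
          let w := PySem.List.pyGetD (PySem.List.pyGetD M i []) j 0
          let yi := PySem.List.pyGetD y i 0
          let yj := PySem.List.pyGetD y j 0
          let m1 := s.1 + w
          if yi = 0 ∧ yj = 0 then (m1, s.2.1 + w, s.2.2.1, s.2.2.2)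
          else if yi * yj = -1 then (m1, s.2.1, s.2.2.1 + w, s.2.2.2)
          else if (yi + yj).natAbs = 1 then (m1, s.2.1, s.2.2.1, s.2.2.2 + w)
          else (m1, s.2.1, s.2.2.1, s.2.2.2)
        else s) s) (0, 0, 0, 0)
    (s.2.2.1, s.2.2.2, s.1 - s.2.1))
    = (pvC ((PySem.List.pyRange 0 (M.length : Int) 1).flatMap (fun i =>
        ((PySem.List.pyGetD L i []).filter (fun j => decide (i < j))).map (fun j =>
          (PySem.List.pyGetD y i 0, PySem.List.pyGetD y j 0,
           PySem.List.pyGetD (PySem.List.pyGetD M i []) j 0)))),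
       pvX ((PySem.List.pyRange 0 (M.length : Int) 1).flatMap (fun i =>
        ((PySem.List.pyGetD L i []).filter (fun j => decide (i < j))).map (fun j =>
          (PySem.List.pyGetD y i 0, PySem.List.pyGetD y j 0,
           PySem.List.pyGetD (PySem.List.pyGetD M i []) j 0)))),
       pvNet ((PySem.List.pyRange 0 (M.length : Int) 1).flatMap (fun i =>
        ((PySem.List.pyGetD L i []).filter (fun j => decide (i < j))).map (fun j =>
          (PySem.List.pyGetD y i 0, PySem.List.pyGetD y j 0,
           PySem.List.pyGetD (PySem.List.pyGetD M i []) j 0)))))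
  rw [← hE]
  simp only []
  rw [show (PySem.List.pyRange 0 (M.length : Int) 1).foldl (fun (s : Int × Int × Int × Int) i =>
      (PySem.List.pyGetD L i []).foldl (fun (s : Int × Int × Int × Int) j =>
        if i < j then
          let w := PySem.List.pyGetD (PySem.List.pyGetD M i []) j 0
          let yi := PySem.List.pyGetD y i 0
          let yj := PySem.List.pyGetD y j 0
          let m1 := s.1 + w
          if yi = 0 ∧ yj = 0 then (m1, s.2.1 + w, s.2.2.1, s.2.2.2)
          else if yi * yj = -1 then (m1, s.2.1, s.2.2.1 + w, s.2.2.2)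
          else if (yi + yj).natAbs = 1 then (m1, s.2.1, s.2.2.1, s.2.2.2 + w)
          else (m1, s.2.1, s.2.2.1, s.2.2.2)
        else s) s) (0, 0, 0, 0)
    = ((PySem.List.pyRange 0 (M.length : Int) 1).flatMap (fun i =>
        ((PySem.List.pyGetD L i []).filter (fun j => decide (i < j))).map (fun j =>
          (PySem.List.pyGetD y i 0, PySem.List.pyGetD y j 0,
           PySem.List.pyGetD (PySem.List.pyGetD M i []) j 0)))).foldl pvStep (0, 0, 0, 0)
    from by
      rw [List.foldl_flatMap]
      exact List.foldl_ext _ _ _ (fun s i _ => hfold i s)]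
  rw [pv_fold_step]
  simp
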